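-- pv_equiv track=rewrite | github.com/ravimalik20/leetcode | 811_subdomain_visit_count.py | __generate_subdomains
-- ===== SOURCE A (Python) =====
-- def __generate_subdomains(domain: str) -> list:
--     domain_components = domain.split('.')
--     domain_components.reverse()
--
--     prev = None
--     subdomains = []
--
--     for comp in domain_components:
--         x = f"{comp}.{prev}" if prev is not None else comp
--
--         prev = x
--         subdomains.append(x)
--
--     return subdomains
-- ===== SOURCE B (Python) =====
-- def __generate_subdomains(domain: str) -> list:
--     components = domain.split('.')
--     return ['.'.join(components[i:]) for i in range(len(components) - 1, -1, -1)]
-- ===== Notes on version B (the rewrite author's own statement) =====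
-- stated objective: simpler
-- what changed: B drops the reversed traversal and the running accumulator string: it computes each subdomain independently by joining a tail slice of the component list, iterating the index downward, as a two-line comprehension.
import Mathlib
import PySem

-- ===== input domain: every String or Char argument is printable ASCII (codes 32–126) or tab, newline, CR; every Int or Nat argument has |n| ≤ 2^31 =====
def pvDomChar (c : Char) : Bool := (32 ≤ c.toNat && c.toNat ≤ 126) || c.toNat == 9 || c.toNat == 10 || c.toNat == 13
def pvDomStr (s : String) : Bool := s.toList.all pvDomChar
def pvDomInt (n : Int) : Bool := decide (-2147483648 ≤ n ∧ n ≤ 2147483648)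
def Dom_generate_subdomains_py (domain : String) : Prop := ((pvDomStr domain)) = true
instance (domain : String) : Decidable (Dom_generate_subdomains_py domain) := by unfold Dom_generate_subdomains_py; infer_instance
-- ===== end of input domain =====

-- B replaces A's reversed traversal with a running accumulator by a slice-and-join
-- comprehension over a descending index range (objective: simpler). Return values only; no mutation.

-- ===== PORT A =====
def generate_subdomains_py (domain : String) : List String :=
  -- domain_components = domain.split('.'); domain_components.reverse()
  let domain_components := ((PySem.Chars.splitOn domain.toList (String.toList ".")).map String.ofList).reverse
  -- prev = None; subdomains = []; for comp in …: x = f"{comp}.{prev}" if prev is not None else comp; prev = x; subdomains.append(x)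
  (domain_components.foldl
    (fun (st : Option String × List String) comp =>
      let x := match st.1 with
        | some p => PySem.Str.join "." [comp, p]   -- f"{comp}.{prev}" = comp + "." + prev
        | none   => comp
      (some x, st.2 ++ [x]))
    (none, [])).2

-- ===== PORT B =====
def generate_subdomains_py_alt (domain : String) : List String :=
  -- components = domain.split('.')
  let components := (PySem.Chars.splitOn domain.toList (String.toList ".")).map String.ofList
  -- ['.'.join(components[i:]) for i in range(len(components) - 1, -1, -1)]
  (PySem.List.pyRange ((components.length : Int) - 1) (-1) (-1)).map
    (fun i => PySem.Str.join "." (PySem.List.slice components (some i) none))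

-- ===== PRECONDITION & SPEC =====
def Spec_generate_subdomains_py (domain : String) (out : List String) : Prop := out = generate_subdomains_py_alt domain
instance (domain : String) (out : List String) : Decidable (Spec_generate_subdomains_py domain out) := by unfold Spec_generate_subdomains_py; infer_instance

-- ===== CLAIM (what is proved, stated in full; the proofs are below) =====
def Claim_equal_generate_subdomains_py : Prop := ∀ (domain : String), Dom_generate_subdomains_py domain → Spec_generate_subdomains_py domain (generate_subdomains_py domain)

-- ===== LEMMAS AND PROOFS =====

-- the body of A's loop once the accumulator has become 'some p'
def pvAux (rs : List String) (p : String) : List String :=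
  match rs with
  | [] => []
  | c :: t =>
    let x := PySem.Str.join "." [c, p]
    x :: pvAux t x

lemma join_append_join (l : List String) (a b : String) :
    PySem.Str.join "." (l ++ [PySem.Str.join "." [a, b]]) = PySem.Str.join "." (l ++ [a, b]) := by
  apply String.toList_injective
  induction l with
  | nil =>
      simp [PySem.Str.toList_join, PySem.Chars.join_cons_cons, PySem.Chars.join_singleton]
  | cons h t ih =>
      cases t with
      | nil =>
          simp [PySem.Str.toList_join, PySem.Chars.join_cons_cons, PySem.Chars.join_singleton]
      | cons h' t' =>
          simp only [List.cons_append, PySem.Str.toList_join, List.map_cons,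
            PySem.Chars.join_cons_cons] at ih ⊢
          simp only [List.append_cancel_left_eq] at ih ⊢
          exact ih

lemma pvAux_eq (rs : List String) (p : String) :
    pvAux rs p = (List.range rs.length).map
      (fun k => PySem.Str.join "." ((rs.take (k+1)).reverse ++ [p])) := by
  induction rs generalizing p with
  | nil => simp [pvAux]
  | cons c t ih =>
      simp only [pvAux, List.length_cons, List.range_succ_eq_map, List.map_cons, List.map_map,
        List.cons.injEq]
      refine ⟨by simp, ?_⟩
      rw [ih]
      apply List.map_congr_left
      intro k _
      simp only [Function.comp_apply, List.take_succ_cons, List.reverse_cons]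
      rw [show (t.take (k+1)).reverse ++ [c] ++ [p] = (t.take (k+1)).reverse ++ [c, p] by simp,
        ← join_append_join]

-- A's foldl, once prev = some p, appends exactly pvAux rs p
lemma foldl_some (rs : List String) (p : String) (acc : List String) :
    (rs.foldl
      (fun (st : Option String × List String) comp =>
        let x := match st.1 with
          | some q => PySem.Str.join "." [comp, q]
          | none   => comp
        (some x, st.2 ++ [x]))
      (some p, acc)).2 = acc ++ pvAux rs p := by
  induction rs generalizing p acc with
  | nil => simp [pvAux]
  | cons c t ih =>
      simp only [List.foldl_cons, pvAux]
      rw [ih]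
      simp

-- the descending-range comprehension of B, over an arbitrary component list
lemma alt_eq_map (cs : List String) :
    (PySem.List.pyRange ((cs.length : Int) - 1) (-1) (-1)).map
      (fun i => PySem.Str.join "." (PySem.List.slice cs (some i) none))
    = (List.range cs.length).map
      (fun k => PySem.Str.join "." (cs.drop (cs.length - 1 - k))) := by
  rw [PySem.List.pyRange_neg_one, List.map_map]
  have hlen : (((cs.length : Int) - 1) - (-1)).toNat = cs.length := by omega
  rw [hlen]
  apply List.map_congr_left
  intro k hk
  simp only [List.mem_range] at hk
  have h1 : (cs.length : Int) - 1 - (k : Int) = ((cs.length - 1 - k : Nat) : Int) := by omega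
  simp only [Function.comp_apply, h1, PySem.List.slice_from_natCast]

-- core equivalence over the component list
lemma core (cs : List String) :
    (cs.reverse.foldl
      (fun (st : Option String × List String) comp =>
        let x := match st.1 with
          | some q => PySem.Str.join "." [comp, q]
          | none   => comp
        (some x, st.2 ++ [x]))
      (none, [])).2
    = (PySem.List.pyRange ((cs.length : Int) - 1) (-1) (-1)).map
        (fun i => PySem.Str.join "." (PySem.List.slice cs (some i) none)) := by
  rw [alt_eq_map]
  rcases h : cs.reverse with _ | ⟨c, t⟩
  · have : cs = [] := by simpa using congrArg List.reverse h
    simp [this]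
  · -- cs = t.reverse ++ [c]
    have hcs : cs = t.reverse ++ [c] := by
      have := congrArg List.reverse h; simpa using this
    subst hcs
    simp only [List.foldl_cons, List.nil_append]
    rw [foldl_some]
    have hn : (t.reverse ++ [c]).length = t.length + 1 := by simp
    rw [List.singleton_append, hn, List.range_succ_eq_map, List.map_cons, List.cons.injEq]
    constructor
    · -- first element: comp with prev = None, vs '.'.join of the last component alone
      have : (t.reverse ++ [c]).drop (t.length + 1 - 1 - 0) = [c] := by
        simp
      rw [this]
      apply String.toList_injective
      simp [PySem.Str.toList_join, PySem.Chars.join_singleton]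
    · rw [pvAux_eq, List.map_map]
      apply List.map_congr_left
      intro k hk
      simp only [List.mem_range] at hk
      have hdrop : (t.reverse ++ [c]).drop (t.length - (k + 1))
          = (t.take (k+1)).reverse ++ [c] := by
        rw [List.drop_append_of_le_length (by simp)]
        rw [List.drop_reverse]
        congr 2
        simp
        omega
      have h1 : t.length + 1 - 1 - (k + 1) = t.length - (k+1) := by omega
      simp only [Function.comp_apply, h1, hdrop]

-- ===== VERDICT (by name: the statement is the Claim_ definition above) =====
theorem generate_subdomains_py_spec : Claim_equal_generate_subdomains_py := by
  intro domain _
  show generate_subdomains_py domain = generate_subdomains_py_alt domain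
  unfold generate_subdomains_py generate_subdomains_py_alt
  exact core _
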